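-- pv_equiv track=rewrite | github.com/helsharif/cobb-county-code-rag-assistant | src/ingestion.py | split_absolute_page_range
-- ===== SOURCE A (Python) =====
-- DoclingPageRange = tuple[int, int, str]
--
-- def fixed_page_ranges(
--     page_count: int,
--     page_chunk_size: int,
--     overlap: int = 0,
--     label_prefix: str = "pages",
-- ) -> list[DoclingPageRange]:
--     """Return 1-indexed inclusive page ranges, optionally overlapping adjacent windows."""
--     if page_count <= 0:
--         return [(1, 2**31 - 1, label_prefix)]
--     chunk_size = max(page_chunk_size, 1)
--     overlap = max(min(overlap, chunk_size - 1), 0)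
--     ranges: list[DoclingPageRange] = []
--     start_page = 1
--     while start_page <= page_count:
--         end_page = min(start_page + chunk_size - 1, page_count)
--         ranges.append((start_page, end_page, f"{label_prefix} {start_page}-{end_page}"))
--         if end_page == page_count:
--             break
--         start_page = end_page - overlap + 1
--     return ranges
--
-- def split_absolute_page_range(
--     start_page: int,
--     end_page: int,
--     label: str,
--     max_pages: int,
--     overlap: int,
-- ) -> list[DoclingPageRange]:
--     """Split one absolute 1-indexed range only when it exceeds the Docling page budget."""
--     if end_page < start_page:
--         return []
--     section_length = end_page - start_page + 1
--     if section_length <= max_pages: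
--         return [(start_page, end_page, label)]
--
--     section_ranges = fixed_page_ranges(
--         section_length,
--         max_pages,
--         overlap=overlap,
--         label_prefix=label,
--     )
--     return [
--         (start_page + section_start - 1, start_page + section_end - 1, section_label)
--         for section_start, section_end, section_label in section_ranges
--     ]
-- ===== SOURCE B (Python) =====
-- def split_absolute_page_range(start_page, end_page, label, max_pages, overlap):
--     if end_page < start_page:
--         return []
--     n = end_page - start_page + 1
--     if n <= max_pages:
--         return [(start_page, end_page, label)]
--     chunk = max(max_pages, 1)
--     ovl = min(max(overlap, 0), chunk - 1)
--     step = chunk - ovl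
--     nwin = 1 + (max(n - chunk, 0) + step - 1) // step
--     result = [None] * nwin
--     for i in range(nwin):
--         s = 1 + i * step
--         e = min(s + chunk - 1, n)
--         result[i] = (start_page + s - 1, start_page + e - 1, f"{label} {s}-{e}")
--     return result
-- ===== Notes on version B (the rewrite author's own statement) =====
-- stated objective: alternative
-- what changed: Inlined the fixed_page_ranges helper and replaced its data-dependent while loop with a closed-form window count (1 + ceil(max(n-chunk,0)/step)) followed by a direct loop over window indices computing each window by an affine formula.
import Mathlib
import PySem

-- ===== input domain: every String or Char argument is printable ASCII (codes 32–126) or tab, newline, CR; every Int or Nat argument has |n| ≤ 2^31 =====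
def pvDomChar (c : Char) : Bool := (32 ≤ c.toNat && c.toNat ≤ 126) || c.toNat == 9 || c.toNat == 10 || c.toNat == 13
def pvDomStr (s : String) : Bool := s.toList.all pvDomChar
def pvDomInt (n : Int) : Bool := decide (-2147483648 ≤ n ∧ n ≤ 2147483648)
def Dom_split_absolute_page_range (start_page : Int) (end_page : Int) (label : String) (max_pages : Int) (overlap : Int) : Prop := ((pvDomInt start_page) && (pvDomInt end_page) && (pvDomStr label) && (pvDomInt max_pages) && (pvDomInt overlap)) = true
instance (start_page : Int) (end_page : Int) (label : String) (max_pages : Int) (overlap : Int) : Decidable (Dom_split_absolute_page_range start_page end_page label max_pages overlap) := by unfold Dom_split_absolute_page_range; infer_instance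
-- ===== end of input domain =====

-- B replaces A's data-dependent while loop (via the fixed_page_ranges helper) by a closed-form
-- window count and a direct map over window indices; objective: simpler/alternative decomposition.


-- ===== PORT A =====
-- the while loop of fixed_page_ranges; the two hypotheses record the clamping done by the
-- caller (chunk ≥ 1, 0 ≤ ovl ≤ chunk-1) and are needed only for termination
def fprLoop (pc chunk ovl : Int) (lp : String)
    (h1 : 1 ≤ chunk - ovl) (h0 : 0 ≤ ovl) (start : Int) : List (Int × Int × String) :=
  if hs : start ≤ pc then
    -- e := min (start + chunk - 1) pc, inlined at each use
    (start, min (start + chunk - 1) pc,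
      lp ++ " " ++ PySem.Int.toStr start ++ "-" ++ PySem.Int.toStr (min (start + chunk - 1) pc)) ::
      (if he : min (start + chunk - 1) pc = pc then []
       else fprLoop pc chunk ovl lp h1 h0 (min (start + chunk - 1) pc - ovl + 1))
  else []
termination_by (pc + 1 - start).toNat
decreasing_by omega

def fixed_page_ranges (page_count page_chunk_size overlap : Int) (label_prefix : String) : List (Int × Int × String) :=
  if page_count ≤ 0 then [(1, 2 ^ 31 - 1, label_prefix)]
  else
    fprLoop page_count (max page_chunk_size 1)
      (max (min overlap (max page_chunk_size 1 - 1)) 0) label_prefix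
      (by omega) (by omega) 1

def split_absolute_page_range (start_page : Int) (end_page : Int) (label : String) (max_pages : Int) (overlap : Int) : List (Int × Int × String) :=
  if end_page < start_page then []
  else
    let section_length := end_page - start_page + 1
    if section_length ≤ max_pages then [(start_page, end_page, label)]
    else
      (fixed_page_ranges section_length max_pages overlap label).map
        (fun t => (start_page + t.1 - 1, start_page + t.2.1 - 1, t.2.2))

-- ===== PORT B =====
def split_absolute_page_range_alt (start_page : Int) (end_page : Int) (label : String) (max_pages : Int) (overlap : Int) : List (Int × Int × String) :=
  if end_page < start_page then []
  else
    let n := end_page - start_page + 1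
    if n ≤ max_pages then [(start_page, end_page, label)]
    else
      let chunk := max max_pages 1
      let ovl := min (max overlap 0) (chunk - 1)
      let step := chunk - ovl
      let nwin := 1 + (max (n - chunk) 0 + step - 1) / step
      (List.range nwin.toNat).map (fun (i : Nat) =>
        let s : Int := 1 + (i : Int) * step
        let e : Int := min (s + chunk - 1) n
        (start_page + s - 1, start_page + e - 1,
          label ++ " " ++ PySem.Int.toStr s ++ "-" ++ PySem.Int.toStr e))

-- ===== PRECONDITION & SPEC =====
def Spec_split_absolute_page_range (start_page : Int) (end_page : Int) (label : String) (max_pages : Int) (overlap : Int) (out : List (Int × Int × String)) : Prop := out = split_absolute_page_range_alt start_page end_page label max_pages overlap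
instance (start_page : Int) (end_page : Int) (label : String) (max_pages : Int) (overlap : Int) (out : List (Int × Int × String)) : Decidable (Spec_split_absolute_page_range start_page end_page label max_pages overlap out) := by unfold Spec_split_absolute_page_range; infer_instance

-- ===== CLAIM (what is proved, stated in full; the proofs are below) =====
def Claim_equal_split_absolute_page_range : Prop := ∀ (start_page : Int) (end_page : Int) (label : String) (max_pages : Int) (overlap : Int), Dom_split_absolute_page_range start_page end_page label max_pages overlap → Spec_split_absolute_page_range start_page end_page label max_pages overlap (split_absolute_page_range start_page end_page label max_pages overlap)

-- ===== LEMMAS AND PROOFS =====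

-- number of windows the loop still produces when started at `start`
def nwinFrom (pc chunk step start : Int) : Int :=
  1 + (max (pc - start - chunk + 1) 0 + step - 1) / step

lemma ediv_small_eq_zero (a b : Int) (h0 : 0 ≤ a) (h1 : a < b) : a / b = 0 :=
  Int.ediv_eq_zero_of_lt h0 h1

lemma fprLoop_eq_map (pc chunk ovl : Int) (lp : String)
    (h1 : 1 ≤ chunk - ovl) (h0 : 0 ≤ ovl) :
    ∀ start, start ≤ pc →
      fprLoop pc chunk ovl lp h1 h0 start =
        (List.range (nwinFrom pc chunk (chunk - ovl) start).toNat).map (fun (i : Nat) =>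
          let s : Int := start + (i : Int) * (chunk - ovl)
          let e : Int := min (s + chunk - 1) pc
          (s, e, lp ++ " " ++ PySem.Int.toStr s ++ "-" ++ PySem.Int.toStr e)) := by
  have main : ∀ (k : Nat) (start : Int), (pc + 1 - start).toNat ≤ k → start ≤ pc →
      fprLoop pc chunk ovl lp h1 h0 start =
        (List.range (nwinFrom pc chunk (chunk - ovl) start).toNat).map (fun (i : Nat) =>
          let s : Int := start + (i : Int) * (chunk - ovl)
          let e : Int := min (s + chunk - 1) pc
          (s, e, lp ++ " " ++ PySem.Int.toStr s ++ "-" ++ PySem.Int.toStr e)) := by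
    intro k
    induction k with
    | zero => intro start hk hs; omega
    | succ k ih =>
      intro start hk hs
      rw [fprLoop]
      rw [dif_pos hs]
      by_cases he : min (start + chunk - 1) pc = pc
      · -- last window
        rw [dif_pos he]
        have hm : pc - start - chunk + 1 ≤ 0 := by omega
        have hnw : nwinFrom pc chunk (chunk - ovl) start = 1 := by
          unfold nwinFrom
          have : max (pc - start - chunk + 1) 0 = 0 := by omega
          rw [this]
          have : (0 + (chunk - ovl) - 1) / (chunk - ovl) = 0 :=
            ediv_small_eq_zero _ _ (by omega) (by omega)
          omega
        rw [hnw]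
        norm_num [List.range_succ]
      · -- recurse
        rw [dif_neg he]
        have hmin : min (start + chunk - 1) pc = start + chunk - 1 := by omega
        have hlt : start + chunk - 1 < pc := by omega
        rw [hmin]
        have hs' : start + chunk - 1 - ovl + 1 ≤ pc := by omega
        rw [ih (start + chunk - 1 - ovl + 1) (by omega) hs']
        -- window-count step
        set S := chunk - ovl with hS
        have hnonneg : ∀ m : Int, 0 ≤ (max m 0 + S - 1) / S :=
          fun m => Int.ediv_nonneg (by omega) (by omega)
        have hstep : nwinFrom pc chunk S start
            = nwinFrom pc chunk S (start + chunk - 1 - ovl + 1) + 1 := by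
          unfold nwinFrom
          set m : Int := pc - start - chunk + 1 with hm
          have hm1 : 1 ≤ m := by omega
          have hmax : max m 0 = m := by omega
          have hm' : pc - (start + chunk - 1 - ovl + 1) - chunk + 1 = m - S := by omega
          rw [hmax, hm']
          have hsplit : (m + S - 1) / S = (m - 1) / S + 1 := by
            have := Int.add_mul_ediv_right (m - 1) 1 (show S ≠ 0 by omega)
            have harg : m + S - 1 = m - 1 + 1 * S := by ring
            rw [harg, this]
          by_cases hcase : 1 ≤ m - S
          · have : max (m - S) 0 = m - S := by omega
            rw [this, hsplit]
            have : m - S + S - 1 = m - 1 := by ring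
            rw [this]; omega
          · have : max (m - S) 0 = 0 := by omega
            rw [this, hsplit]
            have hz1 : (0 + S - 1) / S = 0 := ediv_small_eq_zero _ _ (by omega) (by omega)
            have hz2 : (m - 1) / S = 0 := ediv_small_eq_zero _ _ (by omega) (by omega)
            rw [hz1, hz2]; omega
        have hpos : 1 ≤ nwinFrom pc chunk S (start + chunk - 1 - ovl + 1) := by
          unfold nwinFrom; have := hnonneg (pc - (start + chunk - 1 - ovl + 1) - chunk + 1); omega
        have htn : (nwinFrom pc chunk S start).toNat
            = (nwinFrom pc chunk S (start + chunk - 1 - ovl + 1)).toNat + 1 := by omega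
        rw [htn, List.range_succ_eq_map, List.map_cons, List.map_map]
        congr 1
        · simp [hmin]
        · apply List.map_congr_left
          intro i _
          have hseq : start + ((Nat.succ i : Nat) : Int) * S
              = (start + chunk - 1 - ovl + 1) + (i : Int) * S := by
            push_cast; rw [hS]; ring
          simp only [Function.comp_apply, hseq]
  intro start hs
  exact main (pc + 1 - start).toNat start le_rfl hs

theorem split_absolute_page_range_spec : Claim_equal_split_absolute_page_range := by
  intro sp ep lab mp ov _
  unfold Spec_split_absolute_page_range split_absolute_page_range split_absolute_page_range_alt
  by_cases hlt : ep < sp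
  · simp [hlt]
  · rw [if_neg hlt, if_neg hlt]
    by_cases hle : ep - sp + 1 ≤ mp
    · simp [hle]
    · rw [if_neg hle, if_neg hle]
      have hn : 1 ≤ ep - sp + 1 := by omega
      unfold fixed_page_ranges
      rw [if_neg (by omega)]
      rw [fprLoop_eq_map _ _ _ _ _ _ 1 (by omega)]
      rw [List.map_map]
      have hclamp : max (min ov (max mp 1 - 1)) 0 = min (max ov 0) (max mp 1 - 1) := by omega
      have hnw : nwinFrom (ep - sp + 1) (max mp 1)
            (max mp 1 - max (min ov (max mp 1 - 1)) 0) 1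
          = 1 + (max (ep - sp + 1 - max mp 1) 0
              + (max mp 1 - min (max ov 0) (max mp 1 - 1)) - 1)
              / (max mp 1 - min (max ov 0) (max mp 1 - 1)) := by
        unfold nwinFrom
        rw [hclamp]
        have : ep - sp + 1 - 1 - max mp 1 + 1 = ep - sp + 1 - max mp 1 := by ring
        rw [this]
      rw [hnw]
      apply List.map_congr_left
      intro i _
      simp only [Function.comp_apply, hclamp]
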